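-- pv_equiv track=rewrite | github.com/EliahKagan/old-practice-snapshot | main/fill-array-by-1s/fill-array-by-1s.py | max_run_length
-- ===== SOURCE A (Python) =====
-- def max_run_length(values, key):
--     '''The maximum length of runs of key in an iterable, values.'''
--     best = cur = 0
--
--     for x in values:
--         if x == key:
--             cur += 1
--         else:
--             best = max(best, cur)
--             cur = 0
--
--     return max(best, cur)
-- ===== SOURCE B (Python) =====
-- from itertools import groupby
--
--
-- def max_run_length(values, key):
--     '''The maximum length of runs of key in an iterable, values.'''
--     return max((sum(1 for _ in g) for k, g in groupby(values) if k == key),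
--                default=0)
-- ===== Notes on version B (the rewrite author's own statement) =====
-- stated objective: idiomatic
-- what changed: Replaces the explicit running-counter/best-merge loop with itertools.groupby: group consecutive equal elements and take the max length over groups whose key matches, with default 0.
import Mathlib
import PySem

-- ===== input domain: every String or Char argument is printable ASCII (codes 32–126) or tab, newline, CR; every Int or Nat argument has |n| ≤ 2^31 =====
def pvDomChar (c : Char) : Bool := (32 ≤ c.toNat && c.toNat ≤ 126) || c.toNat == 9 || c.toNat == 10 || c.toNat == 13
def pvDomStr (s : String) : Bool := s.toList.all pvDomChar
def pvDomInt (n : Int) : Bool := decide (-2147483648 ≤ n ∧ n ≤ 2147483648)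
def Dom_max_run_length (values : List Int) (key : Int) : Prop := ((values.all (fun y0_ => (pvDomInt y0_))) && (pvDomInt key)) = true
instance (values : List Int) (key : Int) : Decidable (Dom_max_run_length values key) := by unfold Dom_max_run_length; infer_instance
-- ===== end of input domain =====

-- B replaces A's running-counter loop with an itertools.groupby decomposition
-- (max over the lengths of the matching runs, default 0); equally fast, more idiomatic.

-- ===== PORT A =====
-- A's for-loop over (best, cur), then the final max merge.
def max_run_length (values : List Int) (key : Int) : Int :=
  let s := values.foldl
    (fun (s : Int × Int) x => if x = key then (s.1, s.2 + 1) else (max s.1 s.2, 0))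
    (0, 0)
  max s.1 s.2

-- ===== PORT B =====
-- itertools.groupby(values) ported by hand as run-length grouping: the list of
-- (group key, group length) pairs of maximal runs of consecutive equal elements.
def pyGroupby : List Int → List (Int × Int)
  | [] => []
  | x :: xs =>
    match pyGroupby xs with
    | [] => [(x, 1)]
    | (k, n) :: rest => if x = k then (k, n + 1) :: rest else (x, 1) :: (k, n) :: rest

-- max((len of g for k, g in groupby(values) if k == key), default=0)
def max_run_length_alt (values : List Int) (key : Int) : Int :=
  ((pyGroupby values).filterMap
      (fun g => if g.1 = key then some g.2 else none)).foldl max 0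

-- ===== PRECONDITION & SPEC =====
def Spec_max_run_length (values : List Int) (key : Int) (out : Int) : Prop := out = max_run_length_alt values key
instance (values : List Int) (key : Int) (out : Int) : Decidable (Spec_max_run_length values key out) := by unfold Spec_max_run_length; infer_instance

-- ===== CLAIM (what is proved, stated in full; the proofs are below) =====
def Claim_equal_max_run_length : Prop := ∀ (values : List Int) (key : Int), Dom_max_run_length values key → Spec_max_run_length values key (max_run_length values key)

-- ===== LEMMAS AND PROOFS =====

-- length of the leading run of `key`
def leadRun (key : Int) : List Int → Int
  | [] => 0
  | x :: xs => if x = key then 1 + leadRun key xs else 0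

-- reference answer: max run length of `key`
def fSpec (key : Int) : List Int → Int
  | [] => 0
  | x :: xs => if x = key then max (1 + leadRun key xs) (fSpec key xs) else fSpec key xs

-- A's loop continued from a current-run counter `cur` with best = 0
def resC (key : Int) : List Int → Int → Int
  | [], cur => cur
  | x :: xs, cur => if x = key then resC key xs (cur + 1) else max cur (resC key xs 0)

theorem leadRun_nonneg (key : Int) (l : List Int) : 0 ≤ leadRun key l := by
  induction l with
  | nil => simp [leadRun]
  | cons x xs ih => simp only [leadRun]; split <;> omega

theorem fSpec_nonneg (key : Int) (l : List Int) : 0 ≤ fSpec key l := by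
  induction l with
  | nil => simp [fSpec]
  | cons x xs ih =>
    have := leadRun_nonneg key xs
    simp only [fSpec]; split <;> omega

theorem lead_le_f (key : Int) (l : List Int) : leadRun key l ≤ fSpec key l := by
  induction l with
  | nil => simp [leadRun, fSpec]
  | cons x xs ih =>
    have := fSpec_nonneg key xs
    simp only [leadRun, fSpec]; split <;> omega

theorem foldl_max_shift (t : List Int) : ∀ a : Int, 0 ≤ a →
    t.foldl max a = max a (t.foldl max 0) := by
  induction t with
  | nil => intro a ha; simp; omega
  | cons b t ih =>
    intro a ha
    simp only [List.foldl]
    rw [ih (max a b) (by omega), ih (max 0 b) (by omega)]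
    omega

theorem gb_head : ∀ (ys : List Int) (y : Int),
    pyGroupby (y :: ys) = (y, 1 + leadRun y ys) :: pyGroupby (ys.dropWhile (· == y)) := by
  intro ys
  induction ys with
  | nil => intro y; simp [pyGroupby, leadRun]
  | cons z zs ih =>
    intro y
    rw [show pyGroupby (y :: z :: zs)
        = (match pyGroupby (z :: zs) with
           | [] => [(y, 1)]
           | (k, n) :: rest => if y = k then (k, n + 1) :: rest else (y, 1) :: (k, n) :: rest)
      from rfl, ih z]
    by_cases hyz : y = z
    · subst hyz
      simp [leadRun, List.dropWhile]
      ring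
    · have hb : (z == y) = false := by simpa using Ne.symm hyz
      simp [hyz, leadRun, hb, ih z]
      exact fun h => absurd h.symm hyz

theorem fSpec_dropRun (key : Int) (l : List Int) :
    fSpec key l = max (leadRun key l) (fSpec key (l.dropWhile (· == key))) := by
  induction l with
  | nil => simp [fSpec, leadRun]
  | cons x xs ih =>
    by_cases hx : x = key
    · subst hx
      simp [fSpec, leadRun, List.dropWhile] at ih ⊢
      omega
    · have hb : (x == key) = false := by simpa using hx
      have := fSpec_nonneg key (x :: xs)
      simp only [fSpec, leadRun, if_neg hx, List.dropWhile, hb]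
      simp only [fSpec, if_neg hx] at this ⊢
      omega

theorem fSpec_dropNonkey (key x : Int) (hx : x ≠ key) : ∀ l : List Int,
    fSpec key (l.dropWhile (· == x)) = fSpec key l := by
  intro l
  induction l with
  | nil => simp
  | cons z zs ih =>
    by_cases hz : z = x
    · subst hz
      simpa [List.dropWhile, fSpec, hx] using ih
    · have hb : (z == x) = false := by simpa using hz
      simp [List.dropWhile, hb]

theorem alt_eq_f (key : Int) : ∀ (n : ℕ) (l : List Int), l.length ≤ n →
    max_run_length_alt l key = fSpec key l := by
  intro n
  induction n with
  | zero =>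
    intro l hl
    have : l = [] := by cases l <;> simp_all
    subst this
    simp [max_run_length_alt, pyGroupby, fSpec]
  | succ n ih =>
    intro l hl
    cases l with
    | nil => simp [max_run_length_alt, pyGroupby, fSpec]
    | cons x xs =>
      have hlen : (xs.dropWhile (· == x)).length ≤ n := by
        have := List.length_dropWhile_le (p := (· == x)) xs
        simp at hl; omega
      have hrest := ih (xs.dropWhile (· == x)) hlen
      by_cases hx : x = key
      · subst hx
        have h1 := leadRun_nonneg x xs
        have hstep : max_run_length_alt (x :: xs) x
            = ((pyGroupby (xs.dropWhile (· == x))).filterMap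
                (fun g => if g.1 = x then some g.2 else none)).foldl max
                (max 0 (1 + leadRun x xs)) := by
          simp [max_run_length_alt, gb_head xs x]
        rw [hstep, foldl_max_shift _ _ (by omega)]
        simp only [max_run_length_alt] at hrest
        rw [hrest]
        have hdrop := fSpec_dropRun x xs
        have h2 := fSpec_nonneg x (xs.dropWhile (· == x))
        simp only [fSpec, if_true, eq_self_iff_true]
        omega
      · simp only [max_run_length_alt, gb_head xs x, List.filterMap_cons, if_neg hx]
        have hd : ((pyGroupby (xs.dropWhile (· == x))).filterMap
            (fun g => if g.1 = key then some g.2 else none)).foldl max 0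
            = fSpec key (xs.dropWhile (· == x)) := hrest
        rw [hd, fSpec_dropNonkey key x hx xs]
        simp [fSpec, hx]

theorem foldl_A (key : Int) : ∀ (l : List Int) (best cur : Int),
    max (l.foldl
        (fun (s : Int × Int) x => if x = key then (s.1, s.2 + 1) else (max s.1 s.2, 0))
        (best, cur)).1
      (l.foldl
        (fun (s : Int × Int) x => if x = key then (s.1, s.2 + 1) else (max s.1 s.2, 0))
        (best, cur)).2 = max best (resC key l cur) := by
  intro l
  induction l with
  | nil => intro best cur; simp [resC]
  | cons x xs ih =>
    intro best cur
    by_cases hx : x = key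
    · simp only [List.foldl, if_pos hx, resC, ih]
    · simp only [List.foldl, if_neg hx, resC, if_neg hx, ih]
      omega

theorem resC_eq (key : Int) : ∀ (l : List Int) (cur : Int), 0 ≤ cur →
    resC key l cur = max (cur + leadRun key l) (fSpec key l) := by
  intro l
  induction l with
  | nil => intro cur h; simp [resC, leadRun, fSpec]; omega
  | cons x xs ih =>
    intro cur h
    by_cases hx : x = key
    · have := ih (cur + 1) (by omega)
      simp only [resC, if_pos hx, leadRun, if_pos hx, fSpec, this]
      omega
    · have := ih 0 le_rfl
      have hle := lead_le_f key xs
      simp only [resC, if_neg hx, leadRun, if_neg hx, fSpec, this]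
      omega

-- ===== VERDICT (by name: the statement is the Claim_ definition above) =====
theorem max_run_length_spec : Claim_equal_max_run_length := by
  intro values key _
  unfold Spec_max_run_length
  have hA := foldl_A key values 0 0
  have hR := resC_eq key values 0 le_rfl
  have hB := alt_eq_f key values.length values le_rfl
  have h1 := leadRun_nonneg key values
  have h2 := lead_le_f key values
  have h3 := fSpec_nonneg key values
  simp only [max_run_length]
  rw [hB]
  omega
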